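-- pv_equiv track=rewrite | github.com/ComputationalReflection/stypy | testing/test_programs/stypy_code_copy/stypy_copy/reporting_copy/print_utils_copy.py | get_param_position
-- ===== SOURCE A (Python) =====
-- def get_param_position(source_code, param_number):
--     """
--     Get the offset of a parameter within a source code line that specify a method header. This is used to mark
--     parameters with type errors when reporting them.
--
--     :param source_code: Source code (method header)
--     :param param_number: Number of parameter
--     :return: Offset of the parameter in the source line
--     """
--     try:
--         split_str = source_code.split(',')
--         if param_number >= len(split_str):
--             return 0
--
--         if param_number == 0:
--             name_and_first = split_str[0].split('(')
--             offset = len(name_and_first[0]) + 1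
--
--             blank_offset = 0
--             for car in name_and_first[1]:
--                 if car == " ":
--                     blank_offset += 1
--         else:
--             offset = 0
--             for i in range(param_number):
--                 offset += len(split_str[i]) + 1  # The comma also counts
--
--             blank_offset = 0
--             for car in split_str[param_number]:
--                 if car == " ":
--                     blank_offset += 1
--
--         return offset + blank_offset
--     except:
--         return -1
-- ===== SOURCE B (Python) =====
-- def get_param_position(source_code, param_number):
--     """Offset of a parameter in a method header, by direct index arithmetic
--     (find/count on the string) instead of building split lists.
--     Returns 0 for an out-of-range parameter number, -1 for a line with no '('."""
--     n_fields = source_code.count(',') + 1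
--     if param_number >= n_fields:
--         return 0
--     if param_number == 0:
--         end0 = source_code.find(',')
--         field0 = source_code[:end0] if end0 != -1 else source_code
--         paren = field0.find('(')
--         if paren == -1:
--             return -1
--         return paren + 1 + field0[paren + 1:].count(' ')
--     pos = -1
--     for _ in range(param_number):
--         pos = source_code.find(',', pos + 1)
--     end = source_code.find(',', pos + 1)
--     if end == -1:
--         end = len(source_code)
--     return pos + 1 + source_code[pos + 1:end].count(' ')
-- ===== Notes on version B (the rewrite author's own statement) =====
-- stated objective: alternative
-- what changed: B never builds split lists: it locates the comma/parenthesis boundaries directly with find/count index arithmetic and counts spaces in one slice, instead of splitting on ',' and '(' and looping over list fields. Pre_ excludes negative param_number, outside the function's natural domain, on which A's returned value is an artefact of Python's negative list indexing.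
-- intended difference: When the text before the first comma contains a second '(' followed somewhere by a space (param_number 0), A's blank count stops at that second '(' (an artefact of taking element 1 of the '('-split) and returns a too-small offset, while B counts all spaces in the parameter text after the '(' - consistent with what A itself does for every other parameter - which is the intended blank offset. — e.g. on get_param_position("f(( )", 0): A returns 2, B returns 3
-- outside the precondition, e.g. on get_param_position('f(x, yy )', -1): A returns 2, B returns 0
import Mathlib
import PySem

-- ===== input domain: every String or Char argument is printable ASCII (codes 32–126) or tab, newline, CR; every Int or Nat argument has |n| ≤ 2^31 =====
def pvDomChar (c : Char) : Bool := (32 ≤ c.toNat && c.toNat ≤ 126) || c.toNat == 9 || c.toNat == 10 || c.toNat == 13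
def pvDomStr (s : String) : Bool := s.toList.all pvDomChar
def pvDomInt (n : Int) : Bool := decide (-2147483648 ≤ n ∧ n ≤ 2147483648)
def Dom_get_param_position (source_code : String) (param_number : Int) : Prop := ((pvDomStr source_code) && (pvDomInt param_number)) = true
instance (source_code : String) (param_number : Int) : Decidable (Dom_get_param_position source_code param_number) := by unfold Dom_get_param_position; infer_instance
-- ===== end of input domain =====

-- B replaces A's split-lists with direct find/count index arithmetic on the string (same
-- cost, different decomposition); Pre_ restricts to the natural domain param_number ≥ 0,
-- and D_ states one intended difference in the blank count of parameter 0.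

-- ===== PORT A =====
-- A wraps its whole body in try/except returning -1; the try-body is ported as an
-- Option-valued helper (none = the IndexError the bare except catches).
def getParamPositionTry (source_code : String) (param_number : Int) : Option Int :=
  let split_str := PySem.Chars.splitOn source_code.toList [',']
  if (split_str.length : Int) ≤ param_number then some 0
  else if param_number = 0 then
    match PySem.List.pyGet? split_str 0 with
    | none => none
    | some f0 =>
      let name_and_first := PySem.Chars.splitOn f0 ['(']
      match PySem.List.pyGet? name_and_first 0 with
      | none => none
      | some n0 =>
        let offset : Int := (n0.length : Int) + 1
        match PySem.List.pyGet? name_and_first 1 with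
        | none => none
        | some n1 =>
          let blank := n1.foldl (fun b c => if c == ' ' then b + 1 else b) (0 : Int)
          some (offset + blank)
  else
    match (PySem.List.pyRange 0 param_number).foldl
        (fun acc i =>
          match acc with
          | none => none
          | some a =>
            match PySem.List.pyGet? split_str i with
            | none => none
            | some fi => some (a + (fi.length : Int) + 1)) (some (0 : Int)) with
    | none => none
    | some offset =>
      match PySem.List.pyGet? split_str param_number with
      | none => none
      | some fk =>
        let blank := fk.foldl (fun b c => if c == ' ' then b + 1 else b) (0 : Int)
        some (offset + blank)

def get_param_position (source_code : String) (param_number : Int) : Int :=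
  (getParamPositionTry source_code param_number).getD (-1)

-- ===== PORT B =====
def get_param_position_alt (source_code : String) (param_number : Int) : Int :=
  let s := source_code.toList
  let n_fields : Int := (PySem.Chars.count s [','] : Int) + 1
  if n_fields ≤ param_number then 0
  else if param_number = 0 then
    let end0 := PySem.Chars.find s [',']
    let field0 := if end0 ≠ -1 then PySem.List.slice s none (some end0) else s
    let paren := PySem.Chars.find field0 ['(']
    if paren = -1 then -1
    else
      let seg := PySem.List.slice field0 (some (paren + 1)) none
      paren + 1 + (PySem.Chars.count seg [' '] : Int)
  else
    let pos := (PySem.List.pyRange 0 param_number).foldl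
      (fun pos _ => PySem.Chars.findFrom s [','] (pos + 1)) (-1 : Int)
    let e0 := PySem.Chars.findFrom s [','] (pos + 1)
    let e := if e0 = -1 then (s.length : Int) else e0
    let field := PySem.List.slice s (some (pos + 1)) (some e)
    pos + 1 + (PySem.Chars.count field [' '] : Int)

-- ===== PRECONDITION & SPEC =====
-- Pre_ excludes negative param_number: a parameter index is naturally non-negative, and A's
-- values there are an artefact of Python's negative list indexing, outside the function's
-- natural domain.
def Pre_get_param_position (source_code : String) (param_number : Int) : Prop :=
  0 ≤ param_number
instance (source_code : String) (param_number : Int) : Decidable (Pre_get_param_position source_code param_number) := by unfold Pre_get_param_position; infer_instance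

def pvWitness_get_param_position : String × Int := ("def f(self, a, b):", 1)

-- When the text before the first comma contains a second '(' followed somewhere by a space
-- (param_number 0), A's blank count stops at that second '(' (an artefact of taking element 1
-- of the '('-split) and returns a too-small offset, while B counts all spaces in the parameter
-- text after the '(' — consistent with what A itself does for every other parameter — which is
-- the intended blank offset.
def D_get_param_position (source_code : String) (param_number : Int) : Prop :=
  param_number = 0 ∧
  '(' ∈ source_code.toList.takeWhile (fun c => !decide (c = ',')) ∧
  ' ' ∈ ((source_code.toList.takeWhile (fun c => !decide (c = ','))).dropWhile
          (fun c => !decide (c = '('))).tail.dropWhile (fun c => !decide (c = '('))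
instance (source_code : String) (param_number : Int) : Decidable (D_get_param_position source_code param_number) := by unfold D_get_param_position; infer_instance

def Spec_get_param_position (source_code : String) (param_number : Int) (out : Int) : Prop := ¬ D_get_param_position source_code param_number → out = get_param_position_alt source_code param_number
instance (source_code : String) (param_number : Int) (out : Int) : Decidable (Spec_get_param_position source_code param_number out) := by unfold Spec_get_param_position; infer_instance

def pvDiffWitness_get_param_position : String × Int := ("f(( )", 0)
def pvDiffWitnessOut_get_param_position : Int × Int := (2, 3)

-- ===== CLAIM (what is proved, stated in full; the proofs are below) =====
def Claim_unchanged_get_param_position : Prop := ∀ (source_code : String) (param_number : Int), Dom_get_param_position source_code param_number → Pre_get_param_position source_code param_number → Spec_get_param_position source_code param_number (get_param_position source_code param_number)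
def Claim_changed_get_param_position : Prop := Dom_get_param_position (pvDiffWitness_get_param_position.1) (pvDiffWitness_get_param_position.2) ∧ Pre_get_param_position (pvDiffWitness_get_param_position.1) (pvDiffWitness_get_param_position.2) ∧ D_get_param_position (pvDiffWitness_get_param_position.1) (pvDiffWitness_get_param_position.2) ∧ get_param_position (pvDiffWitness_get_param_position.1) (pvDiffWitness_get_param_position.2) = pvDiffWitnessOut_get_param_position.1 ∧ get_param_position_alt (pvDiffWitness_get_param_position.1) (pvDiffWitness_get_param_position.2) = pvDiffWitnessOut_get_param_position.2 ∧ pvDiffWitnessOut_get_param_position.1 ≠ pvDiffWitnessOut_get_param_position.2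
def Claim_exact_get_param_position : Prop := ∀ (source_code : String) (param_number : Int), Dom_get_param_position source_code param_number → Pre_get_param_position source_code param_number → D_get_param_position source_code param_number → get_param_position source_code param_number ≠ get_param_position_alt source_code param_number

-- ===== LEMMAS AND PROOFS =====

-- Reference splitter: Python's s.split(c) for a single-character separator.
def splitc (sep : Char) : List Char → List (List Char)
  | [] => [[]]
  | c :: t => if c = sep then [] :: splitc sep t else (splitc sep t).modifyHead (c :: ·)

theorem splitc_ne_nil (sep : Char) : ∀ s : List Char, splitc sep s ≠ []
  | [] => by simp [splitc]
  | c :: t => by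
    simp only [splitc]
    split
    · simp
    · cases h : splitc sep t with
      | nil => exact absurd h (splitc_ne_nil sep t)
      | cons a l => simp

-- step equations of the PySem primitives for a single-character pattern
theorem go_split_cons (sep : Char) (fuel : Nat) (c : Char) (rest cur : List Char) (acc : List (List Char)) :
    PySem.Chars.splitOn.go [sep] (fuel+1) (c :: rest) cur acc =
      if c = sep then PySem.Chars.splitOn.go [sep] fuel rest [] (cur.reverse :: acc)
      else PySem.Chars.splitOn.go [sep] fuel rest (c :: cur) acc := by
  rw [PySem.Chars.splitOn.go]
  by_cases h : c = sep
  · subst h; simp [List.isPrefixOf]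
  · simp [List.isPrefixOf, h, Ne.symm h]

theorem go_split_nil (sep : Char) (fuel : Nat) (cur : List Char) (acc : List (List Char)) :
    PySem.Chars.splitOn.go [sep] fuel [] cur acc = (cur.reverse :: acc).reverse := by
  cases fuel <;> rw [PySem.Chars.splitOn.go] <;> simp

theorem go_find_cons (sep c : Char) (t : List Char) (k : Nat) :
    PySem.Chars.find.go [sep] (c :: t) k =
      if c = sep then (k : Int) else PySem.Chars.find.go [sep] t (k+1) := by
  rw [PySem.Chars.find.go]
  by_cases h : c = sep
  · subst h; simp [List.isPrefixOf]
  · simp [List.isPrefixOf, h, Ne.symm h]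

theorem go_find_nil (sep : Char) (k : Nat) : PySem.Chars.find.go [sep] [] k = -1 := by
  rw [PySem.Chars.find.go]; simp

theorem go_count_cons (sep c : Char) (fuel : Nat) (t : List Char) (acc : Nat) :
    PySem.Chars.count.go [sep] (fuel+1) (c :: t) acc =
      if c = sep then PySem.Chars.count.go [sep] fuel t (acc+1)
      else PySem.Chars.count.go [sep] fuel t acc := by
  rw [PySem.Chars.count.go]
  by_cases h : c = sep
  · subst h; simp [List.isPrefixOf]
  · simp [List.isPrefixOf, h, Ne.symm h]

theorem go_count_nil (sep : Char) (fuel acc : Nat) : PySem.Chars.count.go [sep] fuel [] acc = acc := by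
  cases fuel <;> rw [PySem.Chars.count.go] <;> simp

theorem go_split_spec (sep : Char) : ∀ (l : List Char) (fuel : Nat) (cur : List Char) (acc : List (List Char)),
    l.length ≤ fuel →
    PySem.Chars.splitOn.go [sep] fuel l cur acc =
      acc.reverse ++ (cur.reverse ++ (splitc sep l).headI) :: (splitc sep l).tail
  | [], fuel, cur, acc, _ => by simp [go_split_nil, splitc]
  | c :: t, 0, cur, acc, h => by simp at h
  | c :: t, fuel+1, cur, acc, h => by
    rw [go_split_cons]
    obtain ⟨a, l', hl⟩ := List.exists_cons_of_ne_nil (splitc_ne_nil sep t)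
    by_cases hc : c = sep
    · rw [if_pos hc, go_split_spec sep t fuel [] (cur.reverse :: acc) (by simpa using h)]
      simp [splitc, hc, hl]
    · rw [if_neg hc, go_split_spec sep t fuel (c :: cur) acc (by simpa using h)]
      simp [splitc, hc, hl]

theorem splitOn_single (sep : Char) (s : List Char) :
    PySem.Chars.splitOn s [sep] = splitc sep s := by
  unfold PySem.Chars.splitOn
  rw [go_split_spec sep s (s.length+1) [] [] (by omega)]
  obtain ⟨a, l', hl⟩ := List.exists_cons_of_ne_nil (splitc_ne_nil sep s)
  simp [hl]

theorem go_count_spec (sep : Char) : ∀ (l : List Char) (fuel acc : Nat), l.length ≤ fuel →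
    PySem.Chars.count.go [sep] fuel l acc = acc + l.count sep
  | [], fuel, acc, _ => by simp [go_count_nil]
  | c :: t, 0, acc, h => by simp at h
  | c :: t, fuel+1, acc, h => by
    rw [go_count_cons]
    by_cases hc : c = sep
    · rw [if_pos hc, go_count_spec sep t fuel (acc+1) (by simpa using h)]
      simp [List.count_cons, hc]; omega
    · rw [if_neg hc, go_count_spec sep t fuel acc (by simpa using h)]
      simp [List.count_cons, hc]

theorem count_single (sep : Char) (s : List Char) :
    PySem.Chars.count s [sep] = s.count sep := by
  unfold PySem.Chars.count
  simpa using go_count_spec sep s s.length 0 le_rfl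

theorem length_splitc (sep : Char) : ∀ s : List Char, (splitc sep s).length = s.count sep + 1
  | [] => by simp [splitc]
  | c :: t => by
    by_cases hc : c = sep
    · simp [splitc, hc, length_splitc sep t, List.count_cons]
    · simp [splitc, hc, length_splitc sep t, List.count_cons]

theorem headI_splitc (sep : Char) : ∀ s : List Char,
    (splitc sep s).headI = s.takeWhile (fun c => !decide (c = sep))
  | [] => by simp [splitc]
  | c :: t => by
    by_cases hc : c = sep
    · simp [splitc, hc, List.takeWhile_cons]
    · obtain ⟨a, l', hl⟩ := List.exists_cons_of_ne_nil (splitc_ne_nil sep t)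
      have ih := headI_splitc sep t
      rw [hl] at ih
      simp only [List.headI_cons] at ih
      simp [splitc, hc, hl, List.takeWhile_cons, ih]

theorem splitc_of_not_mem (sep : Char) : ∀ s : List Char, sep ∉ s → splitc sep s = [s]
  | [], _ => by simp [splitc]
  | c :: t, h => by
    have hc : c ≠ sep := fun hh => h (hh ▸ List.mem_cons_self)
    have ht : sep ∉ t := fun hh => h (List.mem_cons_of_mem _ hh)
    simp [splitc, hc, splitc_of_not_mem sep t ht]

theorem takeWhile_of_not_mem (sep : Char) : ∀ s : List Char, sep ∉ s →
    s.takeWhile (fun c => !decide (c = sep)) = s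
  | [], _ => by simp
  | c :: t, h => by
    have hc : c ≠ sep := fun hh => h (hh ▸ List.mem_cons_self)
    have ht : sep ∉ t := fun hh => h (List.mem_cons_of_mem _ hh)
    simp [List.takeWhile_cons, hc, takeWhile_of_not_mem sep t ht]

theorem go_find_spec (sep : Char) : ∀ (t : List Char) (k : Nat),
    PySem.Chars.find.go [sep] t k =
      if sep ∈ t then ((k + (t.takeWhile (fun c => !decide (c = sep))).length : Nat) : Int) else -1
  | [], k => by simp [go_find_nil]
  | c :: t, k => by
    rw [go_find_cons]
    by_cases hc : c = sep
    · subst hc; simp [List.takeWhile_cons]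
    · rw [if_neg hc, go_find_spec sep t (k+1)]
      by_cases hm : sep ∈ t
      · rw [if_pos hm, if_pos (List.mem_cons_of_mem _ hm)]
        simp [List.takeWhile_cons, hc]
        omega
      · rw [if_neg hm, if_neg (by simp [hm, Ne.symm hc])]

theorem find_single (sep : Char) (s : List Char) :
    PySem.Chars.find s [sep] =
      if sep ∈ s then (((s.takeWhile (fun c => !decide (c = sep))).length : Nat) : Int) else -1 := by
  unfold PySem.Chars.find
  rw [go_find_spec]
  simp

theorem mem_iff_splitc_length (sep : Char) (s : List Char) :
    sep ∈ s ↔ 2 ≤ (splitc sep s).length := by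
  rw [length_splitc]
  constructor
  · intro h; have := List.count_pos_iff.mpr h; omega
  · intro h
    have : 0 < s.count sep := by omega
    exact List.count_pos_iff.mp this

theorem splitc_decomp (sep : Char) : ∀ (s h : List Char) (r : List (List Char)), r ≠ [] →
    splitc sep s = h :: r → ∃ t', s = h ++ sep :: t' ∧ splitc sep t' = r
  | [], h, r, hr, hs => by
    simp [splitc] at hs
    exact (hr hs.2).elim
  | c :: t, h, r, hr, hs => by
    by_cases hc : c = sep
    · simp only [splitc, if_pos hc] at hs
      have h1 : h = [] := (List.cons.inj hs).1.symm
      have h2 : splitc sep t = r := (List.cons.inj hs).2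
      subst hc
      exact ⟨t, by simp [h1], h2⟩
    · obtain ⟨a, l', hl⟩ := List.exists_cons_of_ne_nil (splitc_ne_nil sep t)
      simp only [splitc, if_neg hc, hl, List.modifyHead_cons] at hs
      have h1 : h = c :: a := (List.cons.inj hs).1.symm
      have h2 : l' = r := (List.cons.inj hs).2
      obtain ⟨t', ht, hsp⟩ := splitc_decomp sep t a r hr (by rw [hl, h2])
      exact ⟨t', by simp [ht, h1], hsp⟩

theorem splitc_last (sep : Char) : ∀ (s h : List Char), splitc sep s = [h] → s = h ∧ sep ∉ s
  | [], h, hs => by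
    simp [splitc] at hs
    subst hs
    exact ⟨rfl, by simp⟩
  | c :: t, h, hs => by
    by_cases hc : c = sep
    · simp only [splitc, if_pos hc] at hs
      exact absurd (List.cons.inj hs).2 (splitc_ne_nil sep t)
    · obtain ⟨a, l', hl⟩ := List.exists_cons_of_ne_nil (splitc_ne_nil sep t)
      simp only [splitc, if_neg hc, hl, List.modifyHead_cons] at hs
      have h1 : h = c :: a := (List.cons.inj hs).1.symm
      have h2 : l' = [] := (List.cons.inj hs).2
      obtain ⟨ht, hm⟩ := splitc_last sep t a (by rw [hl, h2])
      subst ht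
      refine ⟨by rw [h1], ?_⟩
      intro hmem
      rcases List.mem_cons.mp hmem with he | he
      · exact hc he.symm
      · exact hm he

-- field0 of B equals the text before the first comma
theorem field0_eval (s : List Char) :
    (if PySem.Chars.find s [','] ≠ -1
      then PySem.List.slice s none (some (PySem.Chars.find s [','])) else s)
    = s.takeWhile (fun c => !decide (c = ',')) := by
  rw [find_single]
  by_cases hcm : ',' ∈ s
  · rw [if_pos hcm, if_pos (by omega : ¬((((s.takeWhile (fun c => !decide (c = ','))).length : Nat) : Int) = -1)),
       PySem.List.slice_to _ (by omega)]
    rw [Int.toNat_natCast]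
    exact (List.prefix_iff_eq_take.mp (List.takeWhile_prefix _)).symm
  · rw [if_neg hcm, if_neg (by omega : ¬¬((-1 : Int) = -1)),
       takeWhile_of_not_mem ',' s hcm]

theorem pyGet0_splitc (s : List Char) :
    PySem.List.pyGet? (splitc ',' s) 0 = some (s.takeWhile (fun c => !decide (c = ','))) := by
  obtain ⟨a, r, hL⟩ := List.exists_cons_of_ne_nil (splitc_ne_nil ',' s)
  have ha : a = s.takeWhile (fun c => !decide (c = ',')) := by
    have h := headI_splitc ',' s
    rw [hL] at h
    simpa using h
  rw [hL, show (0:Int) = ((0:Nat):Int) from rfl, PySem.List.pyGet?_natCast]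
  simp [ha]

-- Evaluation of both ports at param_number = 0 when a '(' occurs before the first comma:
-- A counts spaces only up to the next '(', B counts all spaces after the '('.
theorem branch0_eval (source_code : String)
    (hp : '(' ∈ source_code.toList.takeWhile (fun c => !decide (c = ','))) :
    get_param_position source_code 0 =
      (((source_code.toList.takeWhile (fun c => !decide (c = ','))).takeWhile (fun c => !decide (c = '('))).length : Int) + 1
      + ((((source_code.toList.takeWhile (fun c => !decide (c = ','))).dropWhile (fun c => !decide (c = '('))).tail.takeWhile (fun c => !decide (c = '('))).count ' ' : Int)
    ∧ get_param_position_alt source_code 0 =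
      (((source_code.toList.takeWhile (fun c => !decide (c = ','))).takeWhile (fun c => !decide (c = '('))).length : Int) + 1
      + ((((source_code.toList.takeWhile (fun c => !decide (c = ','))).dropWhile (fun c => !decide (c = '('))).tail).count ' ' : Int) := by
  unfold get_param_position getParamPositionTry get_param_position_alt
  simp only [splitOn_single, count_single]
  set s := source_code.toList with hs
  set f0 := s.takeWhile (fun c => !decide (c = ',')) with hf0
  have hguardA : ¬(((splitc ',' s).length : Int) ≤ 0) := by
    have := length_splitc ',' s; omega
  have hguardB : ¬((s.count ',' : Int) + 1 ≤ 0) := by omega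
  -- decomposition of f0 at its first '('
  have h2 : 2 ≤ (splitc '(' f0).length := (mem_iff_splitc_length '(' f0).mp hp
  obtain ⟨n0, nf1, hnf0⟩ := List.exists_cons_of_ne_nil (splitc_ne_nil '(' f0)
  have hnf1ne : nf1 ≠ [] := by
    intro h
    rw [h] at hnf0
    rw [hnf0] at h2
    simp at h2
  obtain ⟨n1, nf2, hnf1⟩ := List.exists_cons_of_ne_nil hnf1ne
  rw [hnf1] at hnf0
  have hn0 : n0 = f0.takeWhile (fun c => !decide (c = '(')) := by
    have h := headI_splitc '(' f0
    rw [hnf0] at h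
    simpa using h
  obtain ⟨t', ht, hsp'⟩ := splitc_decomp '(' f0 n0 (n1 :: nf2) (by simp) hnf0
  have hn1 : n1 = t'.takeWhile (fun c => !decide (c = '(')) := by
    have h := headI_splitc '(' t'
    rw [hsp'] at h
    simpa using h
  have hdw : f0.dropWhile (fun c => !decide (c = '(')) = '(' :: t' := by
    have h := List.takeWhile_append_dropWhile (p := fun c => !decide (c = '(')) (l := f0)
    rw [← hn0] at h
    have h2' : n0 ++ f0.dropWhile (fun c => !decide (c = '(')) = n0 ++ '(' :: t' := by
      rw [h, ht]
    exact List.append_cancel_left h2'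
  have htail : (f0.dropWhile (fun c => !decide (c = '('))).tail = t' := by
    rw [hdw]; rfl
  have hdropf0 : f0.drop (n0.length + 1) = t' := by
    rw [ht, show n0 ++ '(' :: t' = (n0 ++ ['(']) ++ t' by simp,
       show n0.length + 1 = (n0 ++ ['(']).length by simp, List.drop_left]
  constructor
  · -- port A
    rw [if_neg hguardA]
    simp only [if_pos trivial, reduceIte]
    have hA0 : PySem.List.pyGet? (splitc ',' s) 0 = some f0 := pyGet0_splitc s
    have hB0 : PySem.List.pyGet? (splitc '(' f0) 0 = some n0 := by
      have := PySem.List.pyGet?_natCast (splitc '(' f0) 0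
      simpa [hnf0] using this
    have hB1 : PySem.List.pyGet? (splitc '(' f0) 1 = some n1 := by
      have := PySem.List.pyGet?_natCast (splitc '(' f0) 1
      simpa [hnf0] using this
    simp only [hA0, hB0, hB1, Option.getD_some]
    rw [PySem.List.foldl_count_if]
    simp only [List.count]
    rw [← hn0, htail, ← hn1]
    push_cast
    ring
  · -- port B
    rw [if_neg hguardB]
    simp only [if_pos trivial, reduceIte]
    have hfield0 : (if PySem.Chars.find s [','] ≠ -1
          then PySem.List.slice s none (some (PySem.Chars.find s [','])) else s) = f0 :=
      field0_eval s
    simp only [hfield0]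
    rw [find_single, if_pos hp, ← hn0,
       if_neg (by omega : ¬((n0.length : Int) = -1)),
       show ((n0.length : Int) + 1) = ((n0.length + 1 : Nat) : Int) by push_cast; ring,
       PySem.List.slice_from_natCast, hdropf0, htail]

-- Both ports return -1 at param_number = 0 when there is no '(' before the first comma.
theorem branch0_noparen (source_code : String)
    (hp : '(' ∉ source_code.toList.takeWhile (fun c => !decide (c = ','))) :
    get_param_position source_code 0 = -1 ∧ get_param_position_alt source_code 0 = -1 := by
  unfold get_param_position getParamPositionTry get_param_position_alt
  simp only [splitOn_single, count_single]
  set s := source_code.toList with hs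
  set f0 := s.takeWhile (fun c => !decide (c = ',')) with hf0
  have hguardA : ¬(((splitc ',' s).length : Int) ≤ 0) := by
    have := length_splitc ',' s; omega
  have hguardB : ¬((s.count ',' : Int) + 1 ≤ 0) := by omega
  constructor
  · rw [if_neg hguardA]
    simp only [if_pos trivial, reduceIte]
    have hA0 : PySem.List.pyGet? (splitc ',' s) 0 = some f0 := pyGet0_splitc s
    have hnf : splitc '(' f0 = [f0] := splitc_of_not_mem '(' f0 hp
    have hB0 : PySem.List.pyGet? (splitc '(' f0) 0 = some f0 := by
      have := PySem.List.pyGet?_natCast (splitc '(' f0) 0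
      simpa [hnf] using this
    have hB1 : PySem.List.pyGet? (splitc '(' f0) 1 = none := by
      have := PySem.List.pyGet?_natCast (splitc '(' f0) 1
      simpa [hnf] using this
    simp only [hA0, hB0, hB1, Option.getD_none]
  · rw [if_neg hguardB]
    simp only [if_pos trivial, reduceIte]
    have hfield0 : (if PySem.Chars.find s [','] ≠ -1
          then PySem.List.slice s none (some (PySem.Chars.find s [','])) else s) = f0 :=
      field0_eval s
    simp only [hfield0]
    rw [find_single, if_neg hp, if_pos (rfl : (-1 : Int) = -1)]

-- character offset of the start of field k (k ≤ number of commas)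
def cstart (s : List Char) : Nat → Nat
  | 0 => 0
  | k+1 => cstart s k + ((splitc ',' s).getD k []).length + 1

theorem suffix_spec (s : List Char) : ∀ k : Nat, k ≤ s.count ',' →
    cstart s k ≤ s.length ∧ splitc ',' (s.drop (cstart s k)) = (splitc ',' s).drop k
  | 0, _ => by simp [cstart]
  | k+1, hk => by
    obtain ⟨hle, hsp⟩ := suffix_spec s k (by omega)
    have hk' : k < (splitc ',' s).length := by rw [length_splitc]; omega
    have hfr : (splitc ',' s).drop k = (splitc ',' s)[k] :: (splitc ',' s).drop (k+1) :=
      List.drop_eq_getElem_cons hk'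
    have hr : (splitc ',' s).drop (k+1) ≠ [] := by
      have : ((splitc ',' s).drop (k+1)).length = s.count ',' - k := by
        simp [length_splitc]
      intro hnil
      rw [hnil] at this
      simp at this
      omega
    obtain ⟨t', ht, hsp'⟩ := splitc_decomp ',' (s.drop (cstart s k)) ((splitc ',' s)[k])
      ((splitc ',' s).drop (k+1)) hr (by rw [hsp, hfr])
    have hgd : (splitc ',' s).getD k [] = (splitc ',' s)[k] := List.getD_eq_getElem _ _ hk'
    have hlen : (s.drop (cstart s k)).length = s.length - cstart s k := List.length_drop ..
    have hlen2 : (s.drop (cstart s k)).length = (splitc ',' s)[k].length + 1 + t'.length := by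
      rw [ht]; simp; omega
    have hcs : cstart s (k+1) = cstart s k + (splitc ',' s)[k].length + 1 := by
      simp [cstart, List.getElem?_eq_getElem hk']
    constructor
    · omega
    · have hdrop : s.drop (cstart s (k+1)) = t' := by
        have h1 : s.drop (cstart s (k+1)) = (s.drop (cstart s k)).drop ((splitc ',' s)[k].length + 1) := by
          rw [List.drop_drop]
          congr 1 <;> omega
        rw [h1, ht]
        have : (splitc ',' s)[k] ++ ',' :: t' = ((splitc ',' s)[k] ++ [',']) ++ t' := by simp
        rw [this]
        have hl1 : (splitc ',' s)[k].length + 1 = ((splitc ',' s)[k] ++ [',']).length := by simp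
        rw [hl1, List.drop_left]
      rw [hdrop, hsp']

theorem pyRange_zero_zero : PySem.List.pyRange 0 0 = [] := by decide

theorem offA_spec (s : List Char) : ∀ k : Nat, k ≤ s.count ',' →
    ((PySem.List.pyRange 0 (k : Int)).foldl
      (fun acc i =>
        match acc with
        | none => none
        | some a =>
          match PySem.List.pyGet? (splitc ',' s) i with
          | none => none
          | some fi => some (a + (fi.length : Int) + 1)) (some (0 : Int)))
    = some (cstart s k : Int)
  | 0, _ => by
    simp [pyRange_zero_zero, cstart]
  | k+1, hk => by
    have hcast : (((k+1 : Nat)) : Int) = (k : Int) + 1 := by push_cast; ring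
    rw [hcast, PySem.List.pyRange_one_succ_right (by omega), List.foldl_append,
        offA_spec s k (by omega)]
    have hk' : k < (splitc ',' s).length := by rw [length_splitc]; omega
    have hget : PySem.List.pyGet? (splitc ',' s) (k : Int) = some (splitc ',' s)[k] := by
      rw [PySem.List.pyGet?_natCast, List.getElem?_eq_getElem hk']
    simp only [List.foldl_cons, List.foldl_nil, hget]
    have hgd : (splitc ',' s).getD k [] = (splitc ',' s)[k] := List.getD_eq_getElem _ _ hk'
    have hcs : cstart s (k+1) = cstart s k + (splitc ',' s)[k].length + 1 := by
      simp [cstart, List.getElem?_eq_getElem hk']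
    rw [hcs]
    push_cast
    ring_nf

theorem posB_spec (s : List Char) : ∀ k : Nat, k ≤ s.count ',' →
    ((PySem.List.pyRange 0 (k : Int)).foldl
      (fun pos _ => PySem.Chars.findFrom s [','] (pos + 1)) (-1 : Int))
    = (cstart s k : Int) - 1
  | 0, _ => by simp [pyRange_zero_zero, cstart]
  | k+1, hk => by
    have hcast : (((k+1 : Nat)) : Int) = (k : Int) + 1 := by push_cast; ring
    rw [hcast, PySem.List.pyRange_one_succ_right (by omega), List.foldl_append,
        posB_spec s k (by omega)]
    simp only [List.foldl_cons, List.foldl_nil]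
    have h1 : (cstart s k : Int) - 1 + 1 = ((cstart s k : Nat) : Int) := by ring
    obtain ⟨hle, hsp⟩ := suffix_spec s k (by omega)
    rw [h1, PySem.Chars.findFrom_natCast s [','] (cstart s k) hle]
    have hk' : k < (splitc ',' s).length := by rw [length_splitc]; omega
    have hmem : ',' ∈ s.drop (cstart s k) := by
      rw [mem_iff_splitc_length, hsp]
      simp [length_splitc]
      omega
    rw [find_single, if_pos hmem]
    have hfr : List.drop k (splitc ',' s) = (splitc ',' s)[k] :: List.drop (k+1) (splitc ',' s) :=
      List.drop_eq_getElem_cons hk'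
    have hh : (s.drop (cstart s k)).takeWhile (fun c => !decide (c = ',')) = (splitc ',' s)[k] := by
      rw [← headI_splitc, hsp, hfr]
      simp only [List.headI_cons]
    rw [hh]
    rw [if_neg (by omega)]
    have hgd : (splitc ',' s).getD k [] = (splitc ',' s)[k] := List.getD_eq_getElem _ _ hk'
    have hcs : cstart s (k+1) = cstart s k + (splitc ',' s)[k].length + 1 := by
      simp [cstart, List.getElem?_eq_getElem hk']
    rw [hcs]
    push_cast
    ring_nf

-- agreement for param_number ≥ 1 (and the out-of-range guard)
theorem agree_pos (source_code : String) (param_number : Int)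
    (hpre : 0 ≤ param_number) (h0 : param_number ≠ 0) :
    get_param_position source_code param_number = get_param_position_alt source_code param_number := by
  unfold get_param_position getParamPositionTry get_param_position_alt
  simp only [splitOn_single, count_single]
  set s := source_code.toList with hs
  have hlen : ((splitc ',' s).length : Int) = (s.count ',' : Int) + 1 := by
    rw [length_splitc]; push_cast; ring
  by_cases hbig : ((s.count ',' : Int) + 1) ≤ param_number
  · rw [if_pos (by rw [hlen]; exact hbig), if_pos hbig]
    rfl
  · rw [if_neg (by rw [hlen]; exact hbig), if_neg hbig, if_neg h0, if_neg h0]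
    set k := param_number.toNat with hkdef
    have hkc : (k : Int) = param_number := Int.toNat_of_nonneg hpre
    have hkcount : k ≤ s.count ',' := by omega
    have hk' : k < (splitc ',' s).length := by rw [length_splitc]; omega
    rw [← hkc, offA_spec s k hkcount, posB_spec s k hkcount]
    have hget : PySem.List.pyGet? (splitc ',' s) (k : Int) = some (splitc ',' s)[k] := by
      rw [PySem.List.pyGet?_natCast, List.getElem?_eq_getElem hk']
    simp only [hget, Option.getD_some]
    obtain ⟨hle, hsp⟩ := suffix_spec s k hkcount
    rw [show (cstart s k : Int) - 1 + 1 = ((cstart s k : Nat) : Int) by ring,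
       PySem.Chars.findFrom_natCast s [','] (cstart s k) hle, find_single]
    by_cases hkc2 : k = s.count ','
    · have hnil : (splitc ',' s).drop (k+1) = [] := by
        apply List.drop_eq_nil_of_le
        rw [length_splitc]
        omega
      have hfr : (splitc ',' s).drop k = [(splitc ',' s)[k]] := by
        rw [List.drop_eq_getElem_cons hk', hnil]
      obtain ⟨hu, hnm⟩ := splitc_last ',' (s.drop (cstart s k)) ((splitc ',' s)[k])
        (by rw [hsp, hfr])
      rw [if_neg hnm, if_pos (rfl : (-1 : Int) = -1), if_pos (rfl : (-1 : Int) = -1),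
         PySem.List.slice_natCast,
         show s.length - cstart s k = (s.drop (cstart s k)).length by simp,
         List.take_length, hu, PySem.List.foldl_count_if]
      simp only [List.count]
      push_cast
      ring
    · have hfr : (splitc ',' s).drop k = (splitc ',' s)[k] :: (splitc ',' s).drop (k+1) :=
        List.drop_eq_getElem_cons hk'
      have hrne : (splitc ',' s).drop (k+1) ≠ [] := by
        have hdl : ((splitc ',' s).drop (k+1)).length = s.count ',' - k := by
          simp [length_splitc]
        intro hnil
        rw [hnil] at hdl
        simp at hdl
        omega
      have hmem : ',' ∈ s.drop (cstart s k) := by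
        rw [mem_iff_splitc_length, hsp]
        simp [length_splitc]
        omega
      have hh : (s.drop (cstart s k)).takeWhile (fun c => !decide (c = ',')) = (splitc ',' s)[k] := by
        rw [← headI_splitc, hsp, hfr]
        simp only [List.headI_cons]
      obtain ⟨t', ht, hsp'⟩ := splitc_decomp ',' (s.drop (cstart s k)) ((splitc ',' s)[k])
        ((splitc ',' s).drop (k+1)) hrne (by rw [hsp, hfr])
      rw [if_pos hmem, hh,
         if_neg (by omega : ¬(((splitc ',' s)[k].length : Int) = -1)),
         if_neg (by omega : ¬(((cstart s k : Nat) : Int) + ((splitc ',' s)[k].length : Int) = -1)),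
         show ((cstart s k : Nat) : Int) + ((splitc ',' s)[k].length : Int)
           = ((cstart s k + (splitc ',' s)[k].length : Nat) : Int) by push_cast; ring,
         PySem.List.slice_natCast,
         show cstart s k + (splitc ',' s)[k].length - cstart s k = (splitc ',' s)[k].length by omega,
         ht,
         show ((splitc ',' s)[k] ++ ',' :: t').take (splitc ',' s)[k].length
           = (splitc ',' s)[k] from List.take_left ..,
         PySem.List.foldl_count_if]
      simp only [List.count]
      push_cast
      ring

-- ===== VERDICT (by name: the statements are the Claim_ definitions above) =====
theorem get_param_position_spec : Claim_unchanged_get_param_position := by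
  intro source_code param_number _hdom hpre
  unfold Spec_get_param_position
  intro hnd
  by_cases h0 : param_number = 0
  · subst h0
    by_cases hp : '(' ∈ source_code.toList.takeWhile (fun c => !decide (c = ','))
    · obtain ⟨hA, hB⟩ := branch0_eval source_code hp
      rw [hA, hB]
      have hns : ' ' ∉ ((source_code.toList.takeWhile (fun c => !decide (c = ','))).dropWhile
          (fun c => !decide (c = '('))).tail.dropWhile (fun c => !decide (c = '(')) := by
        intro hm
        exact hnd ⟨rfl, hp, hm⟩
      have hcnt : (((source_code.toList.takeWhile (fun c => !decide (c = ','))).dropWhile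
            (fun c => !decide (c = '('))).tail).count ' '
          = (((source_code.toList.takeWhile (fun c => !decide (c = ','))).dropWhile
            (fun c => !decide (c = '('))).tail.takeWhile (fun c => !decide (c = '('))).count ' ' := by
        conv_lhs => rw [← List.takeWhile_append_dropWhile
          (p := fun c => !decide (c = '('))
          (l := ((source_code.toList.takeWhile (fun c => !decide (c = ','))).dropWhile
            (fun c => !decide (c = '('))).tail)]
        rw [List.count_append, List.count_eq_zero.mpr hns]
        omega
      rw [hcnt]
    · obtain ⟨hA, hB⟩ := branch0_noparen source_code hp
      rw [hA, hB]
  · exact agree_pos source_code param_number hpre h0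

theorem get_param_position_changed : Claim_changed_get_param_position := by
  unfold Claim_changed_get_param_position
  decide

theorem get_param_position_tight : Claim_exact_get_param_position := by
  intro source_code param_number _hdom _hpre hd
  obtain ⟨h0, hp, hsp⟩ := hd
  subst h0
  obtain ⟨hA, hB⟩ := branch0_eval source_code hp
  rw [hA, hB]
  have hcnt : (((source_code.toList.takeWhile (fun c => !decide (c = ','))).dropWhile
        (fun c => !decide (c = '('))).tail.takeWhile (fun c => !decide (c = '('))).count ' '
      < (((source_code.toList.takeWhile (fun c => !decide (c = ','))).dropWhile
        (fun c => !decide (c = '('))).tail).count ' ' := by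
    conv_rhs => rw [← List.takeWhile_append_dropWhile
      (p := fun c => !decide (c = '('))
      (l := ((source_code.toList.takeWhile (fun c => !decide (c = ','))).dropWhile
        (fun c => !decide (c = '('))).tail)]
    rw [List.count_append]
    have := List.count_pos_iff.mpr hsp
    omega
  intro heq
  omega
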